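-- pv_equiv track=rewrite | github.com/cosminstan90/nrankai-tool | api/workers/fanout_wla_crossref.py | _suggested_content_type
-- ===== SOURCE A (Python) =====
-- def _suggested_content_type(query: str) -> str:
--     q = query.lower()
--     if any(w in q for w in ["price", "cost", "tarif", "pret", "pricing"]):
--         return "pricing_page"
--     if any(w in q for w in ["vs", "versus", "compare", "alternative"]):
--         return "comparison_page"
--     if any(w in q for w in ["how", "what", "why", "guide", "tutorial", "cum"]):
--         return "blog_post"
--     if any(w in q for w in ["near", "local", "city", "oras", "bucuresti", "cluj"]):
--         return "location_page"
--     return "service_page"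
-- ===== SOURCE B (Python) =====
-- # Multi-pattern scan: walk the query once and hash-look-up each fixed-length
-- # window in a keyword->category-index dict, keeping the minimum (highest
-- # priority) category index seen; index 4 = no keyword matched.
-- _KW2IDX = {"price": 0, "cost": 0, "tarif": 0, "pret": 0, "pricing": 0,
--            "vs": 1, "versus": 1, "compare": 1, "alternative": 1,
--            "how": 2, "what": 2, "why": 2, "guide": 2, "tutorial": 2, "cum": 2,
--            "near": 3, "local": 3, "city": 3, "oras": 3, "bucuresti": 3, "cluj": 3}
-- _LENS = (2, 3, 4, 5, 6, 7, 8, 9, 11)  # the distinct keyword lengths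
-- _CATS = ("pricing_page", "comparison_page", "blog_post", "location_page", "service_page")
--
-- def _suggested_content_type(query: str) -> str:
--     q = query.lower()
--     best = 4
--     for i in range(len(q)):
--         for L in _LENS:
--             j = _KW2IDX.get(q[i:i + L])
--             if j is not None and j < best:
--                 best = j
--     return _CATS[best]
-- ===== Notes on version B (the rewrite author's own statement) =====
-- stated objective: alternative
-- what changed: Instead of testing each keyword with substring search, B scans the query once position by position, hash-looks-up each fixed-length window in a keyword-to-category-index dict and keeps the minimum category index (the cascade priority), indexing a category tuple at the end.
import Mathlib
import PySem

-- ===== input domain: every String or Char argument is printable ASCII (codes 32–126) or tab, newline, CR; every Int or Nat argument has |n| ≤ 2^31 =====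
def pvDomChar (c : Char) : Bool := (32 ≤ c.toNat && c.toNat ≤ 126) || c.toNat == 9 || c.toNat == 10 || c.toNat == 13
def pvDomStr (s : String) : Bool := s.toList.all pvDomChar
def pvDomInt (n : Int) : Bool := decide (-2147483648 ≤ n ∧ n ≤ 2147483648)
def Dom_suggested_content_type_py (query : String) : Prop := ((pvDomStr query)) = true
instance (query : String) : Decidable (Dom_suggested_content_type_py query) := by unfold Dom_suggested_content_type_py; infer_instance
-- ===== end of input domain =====

-- B replaces A's per-keyword substring tests by a single positional scan of the query with
-- hash lookups of fixed-length windows in a keyword->category-index dict, keeping the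
-- minimum (highest-priority) index (alternative algorithm, same observable behaviour).

-- ===== PORT A =====
def suggested_content_type_py (query : String) : String :=
  let q := PySem.Str.lower query
  if (["price", "cost", "tarif", "pret", "pricing"].any fun w => PySem.Str.isIn w q) then "pricing_page"
  else if (["vs", "versus", "compare", "alternative"].any fun w => PySem.Str.isIn w q) then "comparison_page"
  else if (["how", "what", "why", "guide", "tutorial", "cum"].any fun w => PySem.Str.isIn w q) then "blog_post"
  else if (["near", "local", "city", "oras", "bucuresti", "cluj"].any fun w => PySem.Str.isIn w q) then "location_page"
  else "service_page"

-- ===== PORT B =====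
def pvKw2Idx : PySem.Dict String Nat := PySem.Dict.mk
  [("price", 0), ("cost", 0), ("tarif", 0), ("pret", 0), ("pricing", 0),
   ("vs", 1), ("versus", 1), ("compare", 1), ("alternative", 1),
   ("how", 2), ("what", 2), ("why", 2), ("guide", 2), ("tutorial", 2), ("cum", 2),
   ("near", 3), ("local", 3), ("city", 3), ("oras", 3), ("bucuresti", 3), ("cluj", 3)]

def pvLens : List Nat := [2, 3, 4, 5, 6, 7, 8, 9, 11]

def pvCats : List String :=
  ["pricing_page", "comparison_page", "blog_post", "location_page", "service_page"]

def suggested_content_type_py_alt (query : String) : String :=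
  let q := PySem.Str.lower query
  let best := (List.range (PySem.Str.len q).toNat).foldl
    (fun b (i : Nat) => pvLens.foldl
      (fun b (L : Nat) =>
        match pvKw2Idx.get? (PySem.Str.slice q (some (i : Int)) (some ((i : Int) + (L : Int)))) with
        | some j => if j < b then j else b
        | none => b) b) 4
  -- _CATS[best]: best is always ≤ 4, so the default is never used
  pvCats.getD best ""

-- ===== PRECONDITION & SPEC =====
def Spec_suggested_content_type_py (query : String) (out : String) : Prop := out = suggested_content_type_py_alt query
instance (query : String) (out : String) : Decidable (Spec_suggested_content_type_py query out) := by unfold Spec_suggested_content_type_py; infer_instance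

-- ===== CLAIM (what is proved, stated in full; the proofs are below) =====
def Claim_equal_suggested_content_type_py : Prop := ∀ (query : String), Dom_suggested_content_type_py query → Spec_suggested_content_type_py query (suggested_content_type_py query)

-- ===== LEMMAS AND PROOFS =====

-- fold with `if j < b then j else b` = running minimum
def pvMF (l : List Nat) (b : Nat) : Nat := l.foldl (fun b j => if j < b then j else b) b

theorem pvMF_append (xs ys : List Nat) (b : Nat) : pvMF (xs ++ ys) b = pvMF ys (pvMF xs b) := by
  simp [pvMF, List.foldl_append]

theorem pvMF_le (l : List Nat) (b : Nat) : pvMF l b ≤ b := by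
  induction l generalizing b with
  | nil => simp [pvMF]
  | cons x xs ih =>
    simp only [pvMF, List.foldl_cons]
    split_ifs with h
    · exact le_trans (ih x) (le_of_lt h)
    · exact ih b

theorem pvMF_le_mem {l : List Nat} {j : Nat} (h : j ∈ l) (b : Nat) : pvMF l b ≤ j := by
  induction l generalizing b with
  | nil => simp at h
  | cons x xs ih =>
    simp only [pvMF, List.foldl_cons]
    rcases List.mem_cons.mp h with rfl | h'
    · split_ifs with hx
      · exact pvMF_le xs j
      · exact le_trans (pvMF_le xs b) (Nat.le_of_not_lt hx)
    · split_ifs with hx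
      · exact ih h' x
      · exact ih h' b

theorem pvMF_mem_or (l : List Nat) (b : Nat) : pvMF l b = b ∨ pvMF l b ∈ l := by
  induction l generalizing b with
  | nil => left; rfl
  | cons x xs ih =>
    simp only [pvMF, List.foldl_cons]
    split_ifs with h
    · rcases ih x with h1 | h1
      · right; simp [pvMF] at h1 ⊢; simp [h1]
      · right; exact List.mem_cons_of_mem _ h1
    · rcases ih b with h1 | h1
      · left; exact h1
      · right; exact List.mem_cons_of_mem _ h1

theorem pvInner_eq (f : Nat → Option Nat) (l : List Nat) (b : Nat) :
    l.foldl (fun b L => match f L with | some j => if j < b then j else b | none => b) b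
      = pvMF (l.filterMap f) b := by
  induction l generalizing b with
  | nil => rfl
  | cons x xs ih =>
    simp only [List.foldl_cons, List.filterMap_cons]
    cases hfx : f x with
    | none => simpa using ih b
    | some j => simpa [pvMF] using ih _

theorem pvOuter_eq (c : Nat → List Nat) (l : List Nat) (b : Nat) :
    l.foldl (fun b i => pvMF (c i) b) b = pvMF (l.flatMap c) b := by
  induction l generalizing b with
  | nil => rfl
  | cons x xs ih =>
    simp only [List.foldl_cons, List.flatMap_cons, pvMF_append]
    exact ih _

-- the list of category indices B's scan encounters
def pvCands (q : String) : List Nat :=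
  (List.range (PySem.Str.len q).toNat).flatMap fun (i : Nat) =>
    pvLens.filterMap fun (L : Nat) =>
      pvKw2Idx.get? (PySem.Str.slice q (some (i : Int)) (some ((i : Int) + (L : Int))))

theorem pvAlt_eq (query : String) :
    suggested_content_type_py_alt query =
      pvCats.getD (pvMF (pvCands (PySem.Str.lower query)) 4) "" := by
  unfold suggested_content_type_py_alt pvCands
  simp only [pvInner_eq, pvOuter_eq]

theorem pvTblFacts : ∀ p ∈ pvKw2Idx.items,
    p.1.length ∈ pvLens ∧ p.2 < 4 ∧ pvKw2Idx.get? p.1 = some p.2 ∧ p.1.toList ≠ [] := by decide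

theorem pvMem_cands (q : String) (j : Nat) :
    j ∈ pvCands q ↔ ∃ p ∈ pvKw2Idx.items, p.2 = j ∧ PySem.Str.isIn p.1 q = true := by
  constructor
  · intro hj
    simp only [pvCands, List.mem_flatMap, List.mem_range, List.mem_filterMap] at hj
    obtain ⟨i, hi, L, hL, hget⟩ := hj
    refine ⟨(PySem.Str.slice q (some (i : Int)) (some ((i : Int) + (L : Int))), j),
      PySem.Dict.mem_items_of_get?_eq_some _ hget, rfl, ?_⟩
    rw [PySem.Str.isIn_iff_infix]
    have hts : (PySem.Str.slice q (some (i : Int)) (some ((i : Int) + (L : Int)))).toList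
        = (q.toList.drop i).take L := by
      simp [PySem.Str.toList_slice, PySem.List.slice_natCast_add]
    rw [hts]
    exact ((List.take_prefix _ _).isInfix).trans ((List.drop_suffix _ _).isInfix)
  · rintro ⟨⟨w, j'⟩, hp, rfl, hin⟩
    obtain ⟨hlen, _, hget, hne⟩ := pvTblFacts _ hp
    rw [PySem.Str.isIn_iff_infix] at hin
    obtain ⟨s, t, hst⟩ := hin
    simp only [pvCands, List.mem_flatMap, List.mem_range, List.mem_filterMap]
    have hwl : w.toList.length = w.length := by simp
    have hdrop : q.toList.drop s.length = w.toList ++ t := by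
      rw [← hst, List.append_assoc, List.drop_left]
    have htake : (q.toList.drop s.length).take w.length = w.toList := by
      rw [hdrop, ← hwl, List.take_left]
    have hslice : PySem.Str.slice q (some (s.length : Int)) (some ((s.length : Int) + (w.length : Int))) = w := by
      apply String.toList_inj.mp
      simp only [PySem.Str.toList_slice, PySem.Chars.slice_eq_listSlice, PySem.List.slice_natCast_add]
      exact htake
    refine ⟨s.length, ?_, w.length, hlen, ?_⟩
    · have hlq : q.toList.length = s.length + (w.toList.length + t.length) := by
        rw [← hst]; simp
      have hw0 : 0 < w.toList.length := List.length_pos_iff.mpr hne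
      have hlen_eq : (PySem.Str.len q) = (q.toList.length : Int) := by simp [PySem.Str.len]
      rw [hlen_eq]
      omega
    · rw [hslice]; exact hget

theorem pvCat_iff0 (q : String) :
    (∃ p ∈ pvKw2Idx.items, p.2 = 0 ∧ PySem.Str.isIn p.1 q = true) ↔
      ((["price", "cost", "tarif", "pret", "pricing"].any fun w => PySem.Str.isIn w q) = true) := by
  simp [pvKw2Idx]

theorem pvCat_iff1 (q : String) :
    (∃ p ∈ pvKw2Idx.items, p.2 = 1 ∧ PySem.Str.isIn p.1 q = true) ↔
      ((["vs", "versus", "compare", "alternative"].any fun w => PySem.Str.isIn w q) = true) := by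
  simp [pvKw2Idx]

theorem pvCat_iff2 (q : String) :
    (∃ p ∈ pvKw2Idx.items, p.2 = 2 ∧ PySem.Str.isIn p.1 q = true) ↔
      ((["how", "what", "why", "guide", "tutorial", "cum"].any fun w => PySem.Str.isIn w q) = true) := by
  simp [pvKw2Idx]

theorem pvCat_iff3 (q : String) :
    (∃ p ∈ pvKw2Idx.items, p.2 = 3 ∧ PySem.Str.isIn p.1 q = true) ↔
      ((["near", "local", "city", "oras", "bucuresti", "cluj"].any fun w => PySem.Str.isIn w q) = true) := by
  simp [pvKw2Idx]

-- ===== VERDICT (by name: the statement is the Claim_ definition above) =====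
theorem suggested_content_type_py_spec : Claim_equal_suggested_content_type_py := by
  intro query _
  unfold Spec_suggested_content_type_py
  rw [pvAlt_eq]
  unfold suggested_content_type_py
  set q := PySem.Str.lower query with hq
  set M := pvMF (pvCands q) 4 with hM
  have hM4 : M ≤ 4 := pvMF_le _ _
  have hle : ∀ j ∈ pvCands q, M ≤ j := fun j hj => pvMF_le_mem hj 4
  have hmem := pvMF_mem_or (pvCands q) 4
  rw [← hM] at hmem
  have hlt4 : ∀ j ∈ pvCands q, j < 4 := by
    intro j hj
    obtain ⟨p, hp, h2, _⟩ := (pvMem_cands q j).mp hj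
    exact h2 ▸ (pvTblFacts p hp).2.1
  have h0 := (pvMem_cands q 0).trans (pvCat_iff0 q)
  have h1 := (pvMem_cands q 1).trans (pvCat_iff1 q)
  have h2 := (pvMem_cands q 2).trans (pvCat_iff2 q)
  have h3 := (pvMem_cands q 3).trans (pvCat_iff3 q)
  dsimp only
  split_ifs with c0 c1 c2 c3
  · have : M = 0 := Nat.le_zero.mp (hle 0 (h0.mpr c0))
    rw [this]; rfl
  · have hb : M ≤ 1 := hle 1 (h1.mpr c1)
    have : M ≠ 0 := by
      intro h
      rcases hmem with hm | hm
      · omega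
      · exact c0 (h0.mp (h ▸ hm))
    have : M = 1 := by omega
    rw [this]; rfl
  · have hb : M ≤ 2 := hle 2 (h2.mpr c2)
    have e0 : M ≠ 0 := by
      intro h; rcases hmem with hm | hm
      · omega
      · exact c0 (h0.mp (h ▸ hm))
    have e1 : M ≠ 1 := by
      intro h; rcases hmem with hm | hm
      · omega
      · exact c1 (h1.mp (h ▸ hm))
    have : M = 2 := by omega
    rw [this]; rfl
  · have hb : M ≤ 3 := hle 3 (h3.mpr c3)
    have e0 : M ≠ 0 := by
      intro h; rcases hmem with hm | hm
      · omega
      · exact c0 (h0.mp (h ▸ hm))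
    have e1 : M ≠ 1 := by
      intro h; rcases hmem with hm | hm
      · omega
      · exact c1 (h1.mp (h ▸ hm))
    have e2 : M ≠ 2 := by
      intro h; rcases hmem with hm | hm
      · omega
      · exact c2 (h2.mp (h ▸ hm))
    have : M = 3 := by omega
    rw [this]; rfl
  · have : M = 4 := by
      rcases hmem with hm | hm
      · exact hm
      · have h4 := hlt4 M hm
        have hc : M = 0 ∨ M = 1 ∨ M = 2 ∨ M = 3 := by omega
        rcases hc with h | h | h | h
        · exact absurd (h0.mp (h ▸ hm)) c0
        · exact absurd (h1.mp (h ▸ hm)) c1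
        · exact absurd (h2.mp (h ▸ hm)) c2
        · exact absurd (h3.mp (h ▸ hm)) c3
    rw [this]; rfl
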